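-- pv_equiv track=rewrite | github.com/daleysoftware/codeeval | 2-hard/string-searching/main.py | search
-- ===== SOURCE A (Python) =====
-- def search(to_search, pattern):
--     to_search = to_search.replace("*", "#")
--     pattern = pattern.replace("\\*", "#")
--
--     for p in pattern.split("*"):
--         found_index = to_search.find(p)
--         if found_index < 0:
--             return False
--
--         to_search = to_search[found_index+len(p):]
--
--     return True
-- ===== SOURCE B (Python) =====
-- def init_row(pp):
--     dp = [True]
--     for c in pp:
--         dp.append(dp[-1] and c == "*")
--     return dp
--
--
-- def next_row(pp, dp, ch):
--     ndp = [False]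
--     for j, c in enumerate(pp):
--         ndp.append((ndp[-1] or dp[j + 1]) if c == "*" else (dp[j] and c == ch))
--     return ndp
--
--
-- def search(to_search, pattern):
--     s = to_search.replace("*", "#")
--     pp = "*" + pattern.replace("\\*", "#") + "*"
--     dp = init_row(pp)
--     for ch in s:
--         dp = next_row(pp, dp, ch)
--     return dp[-1]
-- ===== Notes on version B (the rewrite author's own statement) =====
-- stated objective: alternative
-- what changed: B replaces A's greedy piece-by-piece find loop with a dynamic-programming (NFA-row) wildcard matcher: it matches the whole text against the pattern '*'+p+'*' character by character, maintaining a boolean row over pattern prefixes.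
import Mathlib
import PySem

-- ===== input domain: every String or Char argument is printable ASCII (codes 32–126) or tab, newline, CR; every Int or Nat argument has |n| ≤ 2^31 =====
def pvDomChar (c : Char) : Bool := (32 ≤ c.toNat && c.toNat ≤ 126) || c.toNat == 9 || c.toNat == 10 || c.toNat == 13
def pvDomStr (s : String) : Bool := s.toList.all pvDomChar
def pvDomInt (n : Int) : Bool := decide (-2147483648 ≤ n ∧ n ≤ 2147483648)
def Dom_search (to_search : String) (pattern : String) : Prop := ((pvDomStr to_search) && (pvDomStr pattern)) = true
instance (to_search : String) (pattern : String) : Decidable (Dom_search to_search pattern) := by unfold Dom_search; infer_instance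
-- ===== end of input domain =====

-- B replaces A's greedy piece-by-piece find loop with a dynamic-programming (NFA-row)
-- wildcard matcher over the pattern '*'+p+'*'; alternative algorithm, same result.

-- ===== PORT A =====
-- the 'for p in pattern.split("*")' loop of A, state = current to_search
def searchPieceLoop : List (List Char) → List Char → Bool
  | [], _ => true
  | p :: ps, s =>
    let foundIndex := PySem.Chars.find s p
    if foundIndex < 0 then false
    else searchPieceLoop ps (PySem.Chars.slice s (some (foundIndex + p.length)) none)

def search (to_search : String) (pattern : String) : Bool :=
  searchPieceLoop
    (PySem.Chars.splitOn (PySem.Chars.replace pattern.toList ['\\', '*'] ['#']) ['*'])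
    (PySem.Chars.replace to_search.toList ['*'] ['#'])

-- ===== PORT B =====
-- init_row of Source B: dp over pattern prefixes for the empty text; 'prev' is dp[-1]
def initAux : Bool → List Char → List Bool
  | _, [] => []
  | prev, c :: p => let b := prev && (c == '*'); b :: initAux b p

def initRow (pp : List Char) : List Bool := true :: initAux true pp

-- next_row of Source B: the j-indexed loop is transcribed as a walk down the pattern,
-- sliding the previous row along with it (dp.headD = dp[j], dp.tail.headD = dp[j+1]);
-- 'carry' is ndp[-1]
def nextAux (ch : Char) : Bool → List Bool → List Char → List Bool
  | _, _, [] => []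
  | carry, dp, c :: p =>
      let b := if c == '*' then (carry || dp.tail.headD false) else (dp.headD false && (c == ch))
      b :: nextAux ch b dp.tail p

def nextRow (pp : List Char) (dp : List Bool) (ch : Char) : List Bool :=
  false :: nextAux ch false dp pp

def search_alt (to_search : String) (pattern : String) : Bool :=
  let s := PySem.Chars.replace to_search.toList ['*'] ['#']
  let pp := '*' :: PySem.Chars.replace pattern.toList ['\\', '*'] ['#'] ++ ['*']
  (s.foldl (fun dp ch => nextRow pp dp ch) (initRow pp)).getLastD false

-- ===== PRECONDITION & SPEC =====
def Spec_search (to_search : String) (pattern : String) (out : Bool) : Prop := out = search_alt to_search pattern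
instance (to_search : String) (pattern : String) (out : Bool) : Decidable (Spec_search to_search pattern out) := by unfold Spec_search; infer_instance

-- ===== CLAIM (what is proved, stated in full; the proofs are below) =====
def Claim_equal_search : Prop := ∀ (to_search : String) (pattern : String), Dom_search to_search pattern → Spec_search to_search pattern (search to_search pattern)

-- ===== LEMMAS AND PROOFS =====

-- reference wildcard matcher ('*' matches any sequence), structural on the pattern
def wm : List Char → List Char → Bool
  | [], t => t.isEmpty
  | c :: q, t =>
    if c == '*' then (List.range (t.length + 1)).any (fun i => wm q (t.drop i))
    else match t with
      | [] => false
      | d :: t' => c == d && wm q t'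

-- reference splitter: split on '*'
def splitStar : List Char → List (List Char)
  | [] => [[]]
  | c :: rest => if c = '*' then [] :: splitStar rest else (splitStar rest).modifyHead (c :: ·)

-- the pieces occur in order, left to right
def PieceEmbeds : List (List Char) → List Char → Prop
  | [], _ => True
  | p :: ps, s => ∃ i, i ≤ s.length ∧ p <+: s.drop i ∧ PieceEmbeds ps (s.drop (i + p.length))

-- first piece anchored at the start
def PE0 : List (List Char) → List Char → Prop
  | [], _ => True
  | q :: qs, s => q <+: s ∧ PieceEmbeds qs (s.drop q.length)

theorem embeds_drop (ps : List (List Char)) (u : List Char) (k : Nat)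
    (hk : k ≤ u.length) (h : PieceEmbeds ps (u.drop k)) : PieceEmbeds ps u := by
  cases ps with
  | nil => trivial
  | cons p tail =>
    obtain ⟨i, hi, hpre, htail⟩ := h
    refine ⟨k + i, ?_, ?_, ?_⟩
    · simp only [List.length_drop] at hi; omega
    · rw [show u.drop (k + i) = (u.drop k).drop i by simp [List.drop_drop]]
      exact hpre
    · rw [show u.drop (k + i + p.length) = (u.drop k).drop (i + p.length) by
        simp [List.drop_drop]; ring_nf]
      exact htail

theorem infix_iff_exists_drop (sub s : List Char) :
    sub <:+: s ↔ ∃ i, i ≤ s.length ∧ sub <+: s.drop i := by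
  constructor
  · rintro ⟨t, u, rfl⟩
    refine ⟨t.length, by simp, ?_⟩
    simp [List.drop_left']
  · rintro ⟨i, _, hpre⟩
    exact hpre.isInfix.trans (s.drop_suffix i).isInfix

theorem loopA_iff (ps : List (List Char)) (s : List Char) :
    searchPieceLoop ps s = true ↔ PieceEmbeds ps s := by
  induction ps generalizing s with
  | nil => simp [searchPieceLoop, PieceEmbeds]
  | cons p tail ih =>
    by_cases hf : PySem.Chars.find s p < 0
    · have hni : ¬ p <:+: s := by
        rw [← PySem.Chars.find_eq_neg_one_iff]
        have := PySem.Chars.neg_one_le_find (s := s) (sub := p)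
        omega
      simp only [searchPieceLoop, if_pos hf]
      constructor
      · intro h; exact absurd h (by simp)
      · rintro ⟨i, hi, hpre, -⟩
        exact absurd ((infix_iff_exists_drop p s).mpr ⟨i, hi, hpre⟩) hni
    · have h0 : 0 ≤ PySem.Chars.find s p := by omega
      have hspec := PySem.Chars.find_spec h0
      have hlen := PySem.Chars.find_le_length (s := s) (sub := p)
      have hsl : PySem.Chars.slice s (some (PySem.Chars.find s p + ↑p.length)) none
          = s.drop ((PySem.Chars.find s p).toNat + p.length) := by
        simp only [PySem.Chars.slice_eq_listSlice]
        rw [show ((PySem.Chars.find s p).toNat + p.length)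
            = (PySem.Chars.find s p + ↑p.length).toNat by omega]
        exact PySem.List.slice_from s (by omega)
      have hstep : searchPieceLoop (p :: tail) s
          = searchPieceLoop tail (s.drop ((PySem.Chars.find s p).toNat + p.length)) := by
        simp only [searchPieceLoop, if_neg hf, hsl]
      rw [hstep, ih]
      constructor
      · intro h
        exact ⟨(PySem.Chars.find s p).toNat, by omega, hspec.1, h⟩
      · rintro ⟨i, hi, hpre, hemb⟩
        have hmin : (PySem.Chars.find s p).toNat ≤ i := by
          by_contra hc
          exact hspec.2 i (by omega) hpre
        have hplen : i + p.length ≤ s.length := by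
          have := hpre.length_le
          simp only [List.length_drop] at this
          omega
        apply embeds_drop tail _ (i - (PySem.Chars.find s p).toNat)
        · simp only [List.length_drop]; omega
        · rw [show (s.drop ((PySem.Chars.find s p).toNat + p.length)).drop
              (i - (PySem.Chars.find s p).toNat) = s.drop (i + p.length) by
            rw [List.drop_drop]; congr 1; omega]
          exact hemb

-- splitOn computes splitStar
theorem splitStar_ne_nil (l : List Char) : splitStar l ≠ [] := by
  induction l with
  | nil => simp [splitStar]
  | cons c rest ih =>
    simp only [splitStar]
    split_ifs
    · simp
    · intro h
      have := congrArg List.length h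
      simp at this
      exact ih this

theorem go_spec (fuel : Nat) : ∀ (l : List Char), l.length ≤ fuel → ∀ (cur : List Char) (acc : List (List Char)),
    PySem.Chars.splitOn.go ['*'] fuel l cur acc
      = acc.reverse ++ (splitStar l).modifyHead (cur.reverse ++ ·) := by
  induction fuel with
  | zero =>
    intro l hl cur acc
    have : l = [] := List.eq_nil_of_length_eq_zero (by omega)
    subst this
    simp [PySem.Chars.splitOn.go, splitStar]
  | succ fuel ih =>
    intro l hl cur acc
    cases l with
    | nil => simp [PySem.Chars.splitOn.go, splitStar]
    | cons c rest =>
      by_cases hc : c = '*'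
      · subst hc
        have hpre : (['*'] : List Char).isPrefixOf ('*' :: rest) = true := by
          simp [List.isPrefixOf]
        rw [show PySem.Chars.splitOn.go ['*'] (fuel + 1) ('*' :: rest) cur acc
            = PySem.Chars.splitOn.go ['*'] fuel rest [] (cur.reverse :: acc) by
          simp [PySem.Chars.splitOn.go, hpre]]
        rw [ih rest (by simp at hl; omega) [] (cur.reverse :: acc)]
        cases hrest : splitStar rest with
        | nil => exact absurd hrest (splitStar_ne_nil rest)
        | cons h tl => simp [splitStar, hrest]
      · have hpre : (['*'] : List Char).isPrefixOf (c :: rest) = false := by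
          simp [List.isPrefixOf]
          exact fun h => absurd h.symm hc
        rw [show PySem.Chars.splitOn.go ['*'] (fuel + 1) (c :: rest) cur acc
            = PySem.Chars.splitOn.go ['*'] fuel rest (c :: cur) acc by
          simp [PySem.Chars.splitOn.go, hpre]]
        rw [ih rest (by simp at hl; omega) (c :: cur) acc]
        cases hrest : splitStar rest with
        | nil => exact absurd hrest (splitStar_ne_nil rest)
        | cons h tl => simp [splitStar, hc, hrest]

theorem splitOn_eq_splitStar (l : List Char) :
    PySem.Chars.splitOn l ['*'] = splitStar l := by
  have h := go_spec (l.length + 1) l (by omega) [] []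
  rw [PySem.Chars.splitOn, h]
  generalize splitStar l = z
  cases z <;> simp

-- basic wm lemmas
theorem wm_nil_iff (t : List Char) : wm [] t = true ↔ t = [] := by
  simp [wm]

theorem wm_star_iff (r t : List Char) :
    wm ('*' :: r) t = true ↔ ∃ i, i ≤ t.length ∧ wm r (t.drop i) = true := by
  simp only [wm, if_pos (by decide : ('*' == '*') = true), List.any_eq_true, List.mem_range]
  constructor
  · rintro ⟨i, hi, h⟩; exact ⟨i, by omega, h⟩
  · rintro ⟨i, hi, h⟩; exact ⟨i, by omega, h⟩

theorem wm_lit_iff (c : Char) (q t : List Char) (hc : c ≠ '*') :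
    wm (c :: q) t = true ↔ ∃ t', t = c :: t' ∧ wm q t' = true := by
  cases t with
  | nil => simp [wm, hc]
  | cons d t' =>
    simp only [wm, if_neg (by simpa using hc), Bool.and_eq_true, beq_iff_eq]
    constructor
    · rintro ⟨rfl, h⟩; exact ⟨t', rfl, h⟩
    · rintro ⟨t'', h, hw⟩
      cases h
      exact ⟨rfl, hw⟩

theorem wm_allstar (q : List Char) (t : List Char) (hq : q ≠ []) (h : ∀ c ∈ q, c = '*') :
    wm q t = true := by
  induction q generalizing t with
  | nil => exact absurd rfl hq
  | cons c q' ih =>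
    have hc : c = '*' := h c (by simp)
    subst hc
    rw [wm_star_iff]
    cases q' with
    | nil => exact ⟨t.length, le_refl _, by simp [wm]⟩
    | cons d q'' =>
      exact ⟨0, by omega, by simpa using ih t (by simp) (fun x hx => h x (by simp [hx]))⟩

theorem wm_nil_eq_all (q : List Char) : wm q [] = q.all (· == '*') := by
  induction q with
  | nil => simp [wm]
  | cons c q' ih =>
    by_cases hc : c = '*'
    · subst hc
      rw [show wm ('*' :: q') [] = (List.range 1).any (fun i => wm q' (List.drop i [])) from rfl]
      simp [List.range_one, ih]
    · rw [show wm (c :: q') [] = false from by simp [wm, hc]]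
      simp [hc]

theorem wm_snoc_star (q t : List Char) (ch : Char) :
    wm (q ++ ['*']) (t ++ [ch]) = true ↔ (wm (q ++ ['*']) t = true ∨ wm q (t ++ [ch]) = true) := by
  induction q generalizing t with
  | nil =>
    constructor
    · intro _
      exact Or.inl (wm_allstar ['*'] t (by simp) (by simp))
    · intro _
      exact wm_allstar ['*'] (t ++ [ch]) (by simp) (by simp)
  | cons d q' ih =>
    by_cases hd : d = '*'
    · subst hd
      rw [List.cons_append, wm_star_iff, wm_star_iff, wm_star_iff]
      constructor
      · rintro ⟨i, hi, hw⟩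
        simp only [List.length_append, List.length_cons, List.length_nil] at hi
        rcases Nat.lt_or_ge i (t.length + 1) with hlt | hge
        · have hdrop : (t ++ [ch]).drop i = t.drop i ++ [ch] :=
            List.drop_append_of_le_length (by omega)
          rw [hdrop] at hw
          rcases (ih (t.drop i)).mp hw with hl | hr
          · exact Or.inl ⟨i, by omega, hl⟩
          · refine Or.inr ⟨i, by simp only [List.length_append, List.length_cons, List.length_nil]; omega, ?_⟩
            rwa [List.drop_append_of_le_length (by omega)]
        · have hieq : i = t.length + 1 := by omega
          have hw0 : wm (q' ++ ['*']) [] = true := by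
            rw [hieq] at hw
            simpa using hw
          exact Or.inl ⟨t.length, le_refl _, by
            rw [List.drop_length]
            exact hw0⟩
      · rintro (⟨i, hi, hw⟩ | ⟨i, hi, hw⟩)
        · refine ⟨i, by simp only [List.length_append, List.length_cons, List.length_nil]; omega, ?_⟩
          rw [List.drop_append_of_le_length (by omega)]
          exact (ih (t.drop i)).mpr (Or.inl hw)
        · simp only [List.length_append, List.length_cons, List.length_nil] at hi
          rcases Nat.lt_or_ge i (t.length + 1) with hlt | hge
          · have hdrop : (t ++ [ch]).drop i = t.drop i ++ [ch] :=
              List.drop_append_of_le_length (by omega)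
            rw [hdrop] at hw
            refine ⟨i, by simp only [List.length_append, List.length_cons, List.length_nil]; omega, ?_⟩
            rw [hdrop]
            exact (ih (t.drop i)).mpr (Or.inr hw)
          · have hieq : i = t.length + 1 := by omega
            have hnil : (t ++ [ch]).drop i = [] := by
              apply List.drop_eq_nil_of_le
              simp; omega
            rw [hnil] at hw
            have hall : ∀ c ∈ q', c = '*' := by
              rw [wm_nil_eq_all] at hw
              simpa [List.all_eq_true] using hw
            refine ⟨t.length, by simp only [List.length_append, List.length_cons, List.length_nil]; omega, ?_⟩
            exact wm_allstar (q' ++ ['*']) _ (by simp) (by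
              intro x hx
              rcases List.mem_append.mp hx with h | h
              · exact hall x h
              · simpa using h)
    · simp only [List.cons_append]
      cases t with
      | nil =>
        rw [show (([] : List Char) ++ [ch] : List Char) = [ch] from rfl]
        rw [wm_lit_iff d _ _ hd, wm_lit_iff d _ _ hd, wm_lit_iff d _ _ hd]
        constructor
        · rintro ⟨t', ht', hw⟩
          have : d = ch ∧ t' = [] := by
            cases ht'
            exact ⟨rfl, rfl⟩
          obtain ⟨rfl, rfl⟩ := this
          rw [wm_nil_eq_all, List.all_append] at hw
          simp only [Bool.and_eq_true] at hw
          exact Or.inr ⟨[], rfl, by rw [wm_nil_eq_all]; exact hw.1⟩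
        · rintro (⟨t', ht', hw⟩ | ⟨t', ht', hw⟩)
          · exact absurd (congrArg List.length ht') (by simp)
          · have : d = ch ∧ t' = [] := by
              cases ht'
              exact ⟨rfl, rfl⟩
            obtain ⟨rfl, rfl⟩ := this
            refine ⟨[], rfl, ?_⟩
            rw [wm_nil_eq_all, List.all_append]
            simp only [Bool.and_eq_true]
            rw [wm_nil_eq_all] at hw
            exact ⟨hw, by simp⟩
      | cons e t0 =>
        rw [show ((e :: t0) ++ [ch] : List Char) = e :: (t0 ++ [ch]) from rfl]
        rw [wm_lit_iff d _ _ hd, wm_lit_iff d _ _ hd, wm_lit_iff d _ _ hd]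
        constructor
        · rintro ⟨t', ht', hw⟩
          injection ht' with h1 h2
          subst d
          subst t'
          rcases (ih t0).mp hw with hl | hr
          · exact Or.inl ⟨t0, rfl, hl⟩
          · exact Or.inr ⟨t0 ++ [ch], rfl, hr⟩
        · rintro (⟨t', ht', hw⟩ | ⟨t', ht', hw⟩)
          · injection ht' with h1 h2
            subst d
            subst t'
            exact ⟨t0 ++ [ch], rfl, (ih t0).mpr (Or.inl hw)⟩
          · injection ht' with h1 h2
            subst d
            subst t'
            exact ⟨t0 ++ [ch], rfl, (ih t0).mpr (Or.inr hw)⟩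

theorem wm_snoc_lit (q t : List Char) (c ch : Char) (hc : c ≠ '*') :
    wm (q ++ [c]) (t ++ [ch]) = true ↔ (c = ch ∧ wm q t = true) := by
  induction q generalizing t with
  | nil =>
    rw [List.nil_append, wm_lit_iff c _ _ hc]
    cases t with
    | nil =>
      constructor
      · rintro ⟨t', ht', hw⟩
        have : c = ch ∧ t' = [] := by
          cases ht'
          exact ⟨rfl, rfl⟩
        obtain ⟨rfl, rfl⟩ := this
        exact ⟨rfl, by simp [wm]⟩
      · rintro ⟨rfl, -⟩
        exact ⟨[], rfl, by simp [wm]⟩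
    | cons e t0 =>
      constructor
      · rintro ⟨t', ht', hw⟩
        have : c = e ∧ t' = t0 ++ [ch] := by
          cases ht'
          exact ⟨rfl, rfl⟩
        obtain ⟨rfl, rfl⟩ := this
        rw [wm_nil_iff] at hw
        exact absurd (congrArg List.length hw) (by simp)
      · rintro ⟨rfl, hw⟩
        rw [wm_nil_iff] at hw
        exact absurd (congrArg List.length hw) (by simp)
  | cons d q' ih =>
    by_cases hd : d = '*'
    · subst hd
      rw [List.cons_append, wm_star_iff, wm_star_iff]
      constructor
      · rintro ⟨i, hi, hw⟩
        simp only [List.length_append, List.length_cons, List.length_nil] at hi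
        rcases Nat.lt_or_ge i (t.length + 1) with hlt | hge
        · rw [List.drop_append_of_le_length (by omega)] at hw
          obtain ⟨rfl, hw'⟩ := (ih (t.drop i)).mp hw
          exact ⟨rfl, i, by omega, hw'⟩
        · have hnil : (t ++ [ch]).drop i = [] := by
            apply List.drop_eq_nil_of_le
            simp; omega
          rw [hnil, wm_nil_eq_all, List.all_append] at hw
          simp [hc] at hw
      · rintro ⟨rfl, i, hi, hw⟩
        refine ⟨i, by simp only [List.length_append, List.length_cons, List.length_nil]; omega, ?_⟩
        rw [List.drop_append_of_le_length (by omega)]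
        exact (ih (t.drop i)).mpr ⟨rfl, hw⟩
    · simp only [List.cons_append]
      cases t with
      | nil =>
        rw [show (([] : List Char) ++ [ch] : List Char) = [ch] from rfl]
        rw [wm_lit_iff d _ _ hd]
        constructor
        · rintro ⟨t', ht', hw⟩
          have : d = ch ∧ t' = [] := by
            cases ht'
            exact ⟨rfl, rfl⟩
          obtain ⟨rfl, rfl⟩ := this
          rw [wm_nil_eq_all, List.all_append] at hw
          simp [hc] at hw
        · rintro ⟨rfl, hw⟩
          simp [wm, hd] at hw
      | cons e t0 =>
        rw [show ((e :: t0) ++ [ch] : List Char) = e :: (t0 ++ [ch]) from rfl]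
        rw [wm_lit_iff d _ _ hd, wm_lit_iff d _ _ hd]
        constructor
        · rintro ⟨t', ht', hw⟩
          injection ht' with h1 h2
          subst d
          subst t'
          obtain ⟨hcch, hw'⟩ := (ih t0).mp hw
          exact ⟨hcch, t0, rfl, hw'⟩
        · rintro ⟨hcch, t', ht', hw⟩
          injection ht' with h1 h2
          subst d
          subst t'
          exact ⟨t0 ++ [ch], rfl, (ih t0).mpr ⟨hcch, hw⟩⟩

-- bridge: wm on p++'*' is exactly start-anchored piece embedding of splitStar p
theorem PE_exists (qs : List (List Char)) (s : List Char) :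
    PieceEmbeds qs s ↔ ∃ i, i ≤ s.length ∧ PE0 qs (s.drop i) := by
  cases qs with
  | nil =>
    simp only [PieceEmbeds, PE0]
    exact ⟨fun _ => ⟨0, by omega, trivial⟩, fun _ => trivial⟩
  | cons q qs' =>
    simp only [PieceEmbeds, PE0]
    constructor
    · rintro ⟨i, hi, hp, he⟩
      refine ⟨i, hi, hp, ?_⟩
      rw [List.drop_drop]
      exact he
    · rintro ⟨i, hi, hp, he⟩
      rw [List.drop_drop] at he
      exact ⟨i, hi, hp, he⟩

theorem bridge0 (p : List Char) : ∀ (s : List Char),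
    wm (p ++ ['*']) s = true ↔ PE0 (splitStar p) s := by
  induction p with
  | nil =>
    intro s
    constructor
    · intro _
      exact ⟨List.nil_prefix, trivial⟩
    · intro _
      exact wm_allstar ['*'] s (by simp) (by simp)
  | cons c p' ih =>
    intro s
    by_cases hc : c = '*'
    · subst hc
      rw [List.cons_append, wm_star_iff]
      have : (∃ i, i ≤ s.length ∧ wm (p' ++ ['*']) (s.drop i) = true)
          ↔ ∃ i, i ≤ s.length ∧ PE0 (splitStar p') (s.drop i) :=
        exists_congr fun i => and_congr_right fun _ => ih (s.drop i)
      rw [this, ← PE_exists]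
      show PieceEmbeds (splitStar p') s ↔ PE0 ([] :: splitStar p') s
      constructor
      · intro h
        exact ⟨List.nil_prefix, by simpa using h⟩
      · rintro ⟨-, h⟩
        simpa using h
    · rw [List.cons_append, wm_lit_iff c _ _ hc]
      cases hsp : splitStar p' with
      | nil => exact absurd hsp (splitStar_ne_nil p')
      | cons h tl =>
        rw [show splitStar (c :: p') = (c :: h) :: tl by simp [splitStar, hc, hsp]]
        cases s with
        | nil =>
          constructor
          · rintro ⟨s', hs', -⟩
            exact absurd (congrArg List.length hs') (by simp)
          · rintro ⟨hpre, -⟩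
            exact absurd hpre.length_le (by simp)
        | cons d s0 =>
          constructor
          · rintro ⟨s', hs', hw⟩
            injection hs' with h1 h2
            subst h1
            subst h2
            have := (ih s0).mp hw
            rw [hsp] at this
            obtain ⟨hpre, hemb⟩ := this
            refine ⟨List.cons_prefix_cons.mpr ⟨rfl, hpre⟩, ?_⟩
            simpa [List.drop_succ_cons] using hemb
          · rintro ⟨hpre, hemb⟩
            obtain ⟨rfl, hpre'⟩ := List.cons_prefix_cons.mp hpre
            refine ⟨s0, rfl, ?_⟩
            apply (ih s0).mpr
            rw [hsp]
            exact ⟨hpre', by simpa [List.drop_succ_cons] using hemb⟩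

theorem wm_eq_embeds (p s : List Char) :
    wm ('*' :: p ++ ['*']) s = true ↔ PieceEmbeds (splitStar p) s :=
  (wm_star_iff (p ++ ['*']) s).trans
    ((exists_congr fun i => and_congr_right fun _ => bridge0 p (s.drop i)).trans
      (PE_exists (splitStar p) s).symm)

-- DP row invariant
def RowInv (pp t : List Char) (row : List Bool) : Prop :=
  row.length = pp.length + 1 ∧ ∀ j, j ≤ pp.length → row.getD j false = wm (pp.take j) t

theorem initAux_length (suf : List Char) : ∀ (prev : Bool), (initAux prev suf).length = suf.length := by
  induction suf with
  | nil => intro prev; simp [initAux]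
  | cons c p ih => intro prev; simp [initAux, ih]

theorem initAux_getD (suf : List Char) : ∀ (prev : Bool) (k : Nat), k < suf.length →
    (initAux prev suf).getD k false = (prev && (suf.take (k + 1)).all (· == '*')) := by
  induction suf with
  | nil => intro prev k hk; simp at hk
  | cons c p ih =>
    intro prev k hk
    cases k with
    | zero => simp [initAux]
    | succ k =>
      have := ih (prev && (c == '*')) k (by simpa using hk)
      simp only [initAux, List.getD_cons_succ, this, List.take_succ_cons, List.all_cons]
      rw [Bool.and_assoc]

theorem rowinv_init (pp : List Char) : RowInv pp [] (initRow pp) := by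
  refine ⟨by simp [initRow, initAux_length], ?_⟩
  intro j hj
  cases j with
  | zero => simp [initRow, wm]
  | succ k =>
    rw [initRow, List.getD_cons_succ, initAux_getD pp true k (by omega), wm_nil_eq_all]
    simp

theorem nextAux_length (ch : Char) (suf : List Char) : ∀ (carry : Bool) (dp : List Bool),
    (nextAux ch carry dp suf).length = suf.length := by
  induction suf with
  | nil => intro carry dp; simp [nextAux]
  | cons c p ih => intro carry dp; simp [nextAux, ih]

theorem getD_tail {α : Type} (l : List α) (k : Nat) (d : α) :
    l.tail.getD k d = l.getD (k + 1) d := by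
  cases l <;> simp

theorem nextAux_getD (ch : Char) (t : List Char) (suf : List Char) :
    ∀ (pre : List Char) (dpo : List Bool) (carry : Bool),
    (∀ k, k ≤ suf.length → dpo.getD k false = wm (pre ++ suf.take k) t) →
    carry = wm pre (t ++ [ch]) →
    ∀ k, k < suf.length →
      (nextAux ch carry dpo suf).getD k false = wm (pre ++ suf.take (k + 1)) (t ++ [ch]) := by
  induction suf with
  | nil => intro pre dpo carry _ _ k hk; simp at hk
  | cons c p ih =>
    intro pre dpo carry hdp hcarry k hk
    have hb : (if c == '*' then (carry || dpo.tail.headD false)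
        else (dpo.headD false && (c == ch))) = wm (pre ++ [c]) (t ++ [ch]) := by
      have h0 : dpo.getD 0 false = wm pre t := by
        simpa using hdp 0 (by simp)
      have h1 : dpo.getD 1 false = wm (pre ++ [c]) t := by
        simpa using hdp 1 (by simp)
      by_cases hc : c = '*'
      · subst hc
        rw [if_pos (by decide)]
        rw [show dpo.tail.headD false = dpo.getD 1 false by
          rw [← getD_tail]; cases dpo.tail <;> simp]
        rw [h1, hcarry]
        apply Bool.eq_iff_iff.mpr
        simp only [Bool.or_eq_true]
        rw [wm_snoc_star]
        tauto
      · rw [if_neg (by simpa using hc)]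
        rw [show dpo.headD false = dpo.getD 0 false by cases dpo <;> simp]
        rw [h0]
        apply Bool.eq_iff_iff.mpr
        simp only [Bool.and_eq_true, beq_iff_eq]
        rw [wm_snoc_lit pre t c ch hc]
        tauto
    cases k with
    | zero =>
      simpa [nextAux] using hb
    | succ k =>
      rw [show (nextAux ch carry dpo (c :: p)).getD (k + 1) false
          = (nextAux ch (if c == '*' then (carry || dpo.tail.headD false)
              else (dpo.headD false && (c == ch))) dpo.tail p).getD k false by
        simp [nextAux]]
      rw [ih (pre ++ [c]) dpo.tail _ ?_ hb k (by simpa using hk)]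
      · rw [List.take_succ_cons, show pre ++ c :: p.take (k + 1) = (pre ++ [c]) ++ p.take (k + 1) by simp]
      · intro j hj
        rw [getD_tail]
        rw [hdp (j + 1) (by simpa using hj)]
        rw [List.take_succ_cons, show pre ++ c :: p.take j = (pre ++ [c]) ++ p.take j by simp]

theorem rowinv_step (pp t : List Char) (row : List Bool) (ch : Char)
    (h : RowInv pp t row) : RowInv pp (t ++ [ch]) (nextRow pp row ch) := by
  obtain ⟨hlen, hval⟩ := h
  refine ⟨by simp [nextRow, nextAux_length], ?_⟩
  intro j hj
  cases j with
  | zero => simp [nextRow, wm]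
  | succ k =>
    rw [nextRow, List.getD_cons_succ]
    rw [nextAux_getD ch t pp [] row false (fun k hk => by simpa using hval k hk) (by simp [wm]) k (by omega)]
    simp

theorem rowinv_foldl (pp s : List Char) :
    RowInv pp s (s.foldl (fun dp ch => nextRow pp dp ch) (initRow pp)) := by
  induction s using List.reverseRecOn with
  | nil => exact rowinv_init pp
  | append_singleton t ch ih =>
    rw [List.foldl_append]
    exact rowinv_step pp t _ ch ih

theorem getLastD_of_length {α : Type} (l : List α) (n : Nat) (d : α) (h : l.length = n + 1) :
    l.getLastD d = l.getD n d := by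
  rw [List.getLastD_eq_getLast?, List.getLast?_eq_getElem?, List.getD_eq_getElem?_getD, h]
  simp

theorem search_alt_eq_wm (to_search pattern : String) :
    search_alt to_search pattern
      = wm ('*' :: PySem.Chars.replace pattern.toList ['\\', '*'] ['#'] ++ ['*'])
           (PySem.Chars.replace to_search.toList ['*'] ['#']) := by
  have hinv := rowinv_foldl ('*' :: PySem.Chars.replace pattern.toList ['\\', '*'] ['#'] ++ ['*'])
    (PySem.Chars.replace to_search.toList ['*'] ['#'])
  obtain ⟨hlen, hval⟩ := hinv
  unfold search_alt
  rw [getLastD_of_length _ _ _ hlen]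
  rw [hval _ (le_refl _)]
  show wm _ _ = wm _ _
  rw [show List.take ('*' :: PySem.Chars.replace pattern.toList ['\\', '*'] ['#'] ++ ['*']).length
      ('*' :: PySem.Chars.replace pattern.toList ['\\', '*'] ['#'] ++ ['*'])
      = '*' :: PySem.Chars.replace pattern.toList ['\\', '*'] ['#'] ++ ['*'] from
    List.take_of_length_le (le_refl _)]

-- ===== VERDICT (by name: the statement is the Claim_ definition above) =====
theorem search_spec : Claim_equal_search := by
  intro to_search pattern _
  unfold Spec_search search
  rw [search_alt_eq_wm, splitOn_eq_splitStar]
  have h1 := loopA_iff (splitStar (PySem.Chars.replace pattern.toList ['\\', '*'] ['#']))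
    (PySem.Chars.replace to_search.toList ['*'] ['#'])
  have h2 := wm_eq_embeds (PySem.Chars.replace pattern.toList ['\\', '*'] ['#'])
    (PySem.Chars.replace to_search.toList ['*'] ['#'])
  exact Bool.eq_iff_iff.mpr (h1.trans h2.symm)
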